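-- pv_equiv track=rewrite | github.com/ISE-Research/NotebookCU | src/core/cell_metrics.py | extract_header2_count
-- ===== SOURCE A (Python) =====
-- def extract_header2_count(text: str) -> int:
--     count = 0
--     if text[0:3] == "## ":
--         count += 1
--     for i in range(len(text) - 2):
--         if text[i : i + 4] == " ## " or text[i : i + 4] == "\n## ":
--             count += 1
--     return count
-- ===== SOURCE B (Python) =====
-- def extract_header2_count(text: str) -> int:
--     count = 0
--     pos = text.find("## ")
--     while pos != -1:
--         if pos == 0 or text[pos - 1] in " \n":
--             count += 1
--         pos = text.find("## ", pos + 1)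
--     return count
-- ===== Notes on version B (the rewrite author's own statement) =====
-- stated objective: faster
-- what changed: Replaced A's per-index scan that slices and compares a 4-char window at every position with a str.find skip loop that jumps directly from one '## ' occurrence to the next and checks only the single preceding character.
import Mathlib
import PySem

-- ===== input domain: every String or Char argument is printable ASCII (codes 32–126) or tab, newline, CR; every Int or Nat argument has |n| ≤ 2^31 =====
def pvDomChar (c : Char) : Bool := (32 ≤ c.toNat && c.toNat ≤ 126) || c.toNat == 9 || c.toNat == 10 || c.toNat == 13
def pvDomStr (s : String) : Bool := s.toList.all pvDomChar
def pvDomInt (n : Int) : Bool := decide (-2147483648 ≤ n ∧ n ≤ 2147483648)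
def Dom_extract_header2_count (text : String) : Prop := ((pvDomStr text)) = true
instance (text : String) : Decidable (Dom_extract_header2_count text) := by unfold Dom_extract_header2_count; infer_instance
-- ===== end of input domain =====

-- B replaces A's slice-and-compare scan over every index with a str.find skip loop
-- that jumps from one "## " occurrence to the next and checks only the preceding character.

-- ===== PORT A =====
def extract_header2_count (text : String) : Int :=
  let t := text.toList
  let count : Int := 0
  let count := if PySem.List.slice t (some 0) (some 3) = "## ".toList then count + 1 else count
  (PySem.List.pyRange 0 ((t.length : Int) - 2) 1).foldl
    (fun count i =>
      if PySem.List.slice t (some i) (some (i + 4)) = " ## ".toList ∨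
         PySem.List.slice t (some i) (some (i + 4)) = "\n## ".toList
      then count + 1 else count) count

-- ===== PORT B =====
-- the while-loop of Source B; fuel bounds the iterations (each find result is strictly larger)
def altFindLoop (t : List Char) (pos : Int) (count : Int) : Nat → Int
  | 0 => count
  | fuel + 1 =>
    if pos = -1 then count
    else
      let count :=
        if pos = 0 ∨ PySem.List.pyGetD t (pos - 1) ' ' = ' ' ∨ PySem.List.pyGetD t (pos - 1) ' ' = '\n'
        then count + 1 else count
      altFindLoop t (PySem.Chars.findFrom t "## ".toList (pos + 1)) count fuel

def extract_header2_count_alt (text : String) : Int :=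
  let t := text.toList
  altFindLoop t (PySem.Chars.findFrom t "## ".toList 0) 0 (t.length + 1)

-- ===== PRECONDITION & SPEC =====
def Spec_extract_header2_count (text : String) (out : Int) : Prop := out = extract_header2_count_alt text
instance (text : String) (out : Int) : Decidable (Spec_extract_header2_count text out) := by unfold Spec_extract_header2_count; infer_instance

-- ===== CLAIM (what is proved, stated in full; the proofs are below) =====
def Claim_equal_extract_header2_count : Prop := ∀ (text : String), Dom_extract_header2_count text → Spec_extract_header2_count text (extract_header2_count text)

-- ===== LEMMAS AND PROOFS =====

-- a position p carries a header-2 marker: "## " starts at p, and p is at the start or after ' '/'\n'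
def pvGood (t : List Char) (p : Nat) : Bool :=
  decide ("## ".toList <+: t.drop p) &&
  (p == 0 || decide (t[p-1]? = some ' ' ∨ t[p-1]? = some '\n'))

lemma pvGood_prefix {t : List Char} {p : Nat} (h : pvGood t p = true) :
    "## ".toList <+: t.drop p := by
  simp [pvGood] at h
  exact h.1

lemma pv_prefix_drop_cons (t : List Char) (k : Nat) (a : Char) (l : List Char) :
    a :: l <+: t.drop k ↔ t[k]? = some a ∧ l <+: t.drop (k + 1) := by
  rw [← List.head?_drop, ← List.tail_drop]
  cases h : t.drop k with
  | nil => simp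
  | cons b m => simp [List.cons_prefix_iff, eq_comm]

lemma pvGood_false_of_big (t : List Char) (p : Nat) (h : t.length < p + 3) :
    pvGood t p = false := by
  have hnp : ¬ (['#', '#', ' '] <+: t.drop p) := by
    intro hpre
    have := hpre.length_le
    simp [List.length_drop] at this
    omega
  simp [pvGood]
  exact fun hpre => absurd hpre hnp

lemma pv_countP_range_ext (p : Nat → Bool) (m₁ m₂ : Nat) (h₁ : m₁ ≤ m₂)
    (h : ∀ k, m₁ ≤ k → k < m₂ → p k = false) :
    (List.range m₂).countP p = (List.range m₁).countP p := by
  have : m₂ = m₁ + (m₂ - m₁) := by omega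
  rw [this, List.range_add, List.countP_append]
  have hz : (List.countP p (List.map (fun x => m₁ + x) (List.range (m₂ - m₁)))) = 0 := by
    rw [List.countP_eq_zero]
    intro a ha
    simp only [List.mem_map, List.mem_range] at ha
    obtain ⟨x, hx, rfl⟩ := ha
    simp [h (m₁ + x) (Nat.le_add_right _ _) (by omega : m₁ + x < m₂)]
  omega

lemma pv_window_iff (t : List Char) (k : Nat) :
    ((t.drop k).take 4 = " ## ".toList ∨ (t.drop k).take 4 = "\n## ".toList) ↔
      pvGood t (k + 1) = true := by
  have h4 : ∀ c : Char, (t.drop k).take 4 = c :: "## ".toList ↔ (c :: "## ".toList <+: t.drop k) := by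
    intro c
    constructor
    · intro h; rw [List.prefix_iff_eq_take]; exact h.symm
    · intro h; rw [List.prefix_iff_eq_take] at h; exact h.symm
  rw [show " ## ".toList = ' ' :: "## ".toList from rfl,
      show "\n## ".toList = '\n' :: "## ".toList from rfl, h4, h4,
      pv_prefix_drop_cons, pv_prefix_drop_cons]
  simp [pvGood]
  tauto

lemma pv_altFindLoop_eq (t : List Char) :
    ∀ (fuel a : Nat) (count : Int), a ≤ t.length → t.length + 1 - a ≤ fuel →
      altFindLoop t (PySem.Chars.findFrom t "## ".toList (a : Int)) count fuel
        = count + ((List.range' a (t.length - a)).countP (pvGood t) : Int) := by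
  intro fuel
  induction fuel with
  | zero => intro a count ha hf; omega
  | succ fuel ih =>
    intro a count ha hf
    by_cases hfind : PySem.Chars.findFrom t "## ".toList (a : Int) = -1
    · -- no further match: every position in [a, n) is bad
      have hninf := (PySem.Chars.findFrom_natCast_eq_neg_one_iff t "## ".toList a ha).mp hfind
      have hz : (List.range' a (t.length - a)).countP (pvGood t) = 0 := by
        rw [List.countP_eq_zero]
        intro p hp
        simp only [List.mem_range'_1] at hp
        simp only [Bool.not_eq_true]
        cases hg : pvGood t p with
        | false => rfl
        | true =>
          exfalso
          apply hninf
          have hdd : t.drop p = (t.drop a).drop (p - a) := by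
            rw [List.drop_drop]; congr 1; omega
          exact (pvGood_prefix hg).isInfix.trans (hdd ▸ (List.drop_suffix (p - a) (t.drop a)).isInfix)
      simp only [altFindLoop]
      rw [if_pos hfind, hz]
      simp
    · obtain ⟨hle, hpre, hmin⟩ := PySem.Chars.findFrom_natCast_spec t "## ".toList a ha hfind
      have hf0 : (0:Int) ≤ PySem.Chars.findFrom t "## ".toList (a : Int) :=
        le_trans (by exact_mod_cast Int.natCast_nonneg a) hle
      obtain ⟨q, hfq⟩ : ∃ q : Nat, PySem.Chars.findFrom t "## ".toList (a : Int) = (q : Int) :=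
        ⟨_, (Int.toNat_of_nonneg hf0).symm⟩
      rw [hfq] at hle hpre hmin hfind ⊢
      simp only [Int.toNat_natCast] at hpre hmin
      have hpre' : ['#', '#', ' '] <+: t.drop q := by simpa using hpre
      have haq : a ≤ q := by exact_mod_cast hle
      have hq3 : q + 3 ≤ t.length := by
        have := hpre'.length_le
        simp [List.length_drop] at this
        omega
      -- evaluate the marker test at q
      have hcond : ((q : Int) = 0 ∨ PySem.List.pyGetD t ((q : Int) - 1) ' ' = ' ' ∨
            PySem.List.pyGetD t ((q : Int) - 1) ' ' = '\n') ↔ pvGood t q = true := by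
        rcases Nat.eq_zero_or_pos q with hq0 | hq1
        · subst hq0
          simp [pvGood]
          simpa using hpre'
        · have hq1' : q ≠ 0 := by omega
          have hgd : PySem.List.pyGetD t ((q : Int) - 1) ' ' = t.getD (q - 1) ' ' := by
            rw [show (q : Int) - 1 = ((q - 1 : Nat) : Int) by omega, PySem.List.pyGetD_natCast]
          have hget : t[q-1]? = some (t.getD (q-1) ' ') := by
            rw [List.getElem?_eq_getElem (by omega), List.getD_eq_getElem _ _ (by omega)]
          have hbool : pvGood t q = true ↔ (t[q-1]? = some ' ' ∨ t[q-1]? = some '\n') := by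
            simp [pvGood, hpre', hq1']
          rw [hbool, hgd, hget]
          simp [hq1']
      -- the region [a, q) holds no match
      have hzero : (List.range' a (q - a)).countP (pvGood t) = 0 := by
        rw [List.countP_eq_zero]
        intro p hp
        simp only [List.mem_range'_1] at hp
        simp only [Bool.not_eq_true]
        cases hg : pvGood t p with
        | false => rfl
        | true => exact absurd (pvGood_prefix hg) (hmin p hp.1 (by omega))
      -- split the count region [a, n) = [a, q) ++ [q] ++ [q+1, n)
      have hsplit : List.range' a (t.length - a)
          = List.range' a (q - a) ++ q :: List.range' (q + 1) (t.length - (q + 1)) := by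
        calc List.range' a (t.length - a)
            = List.range' a ((q - a) + ((t.length - (q + 1)) + 1)) := by congr 1; omega
          _ = List.range' a (q - a) ++ List.range' (a + 1 * (q - a)) ((t.length - (q + 1)) + 1) :=
              List.range'_append.symm
          _ = List.range' a (q - a) ++ List.range' q ((t.length - (q + 1)) + 1) := by
              congr 2
              omega
          _ = List.range' a (q - a) ++ q :: List.range' (q + 1) (t.length - (q + 1)) := by
              rw [List.range'_succ]
      -- one loop step, then the induction hypothesis
      have hfind' : ¬ ((q : Int) = -1) := by omega
      have hunf : ∀ (pos count : Int) (fuel : Nat), altFindLoop t pos count (fuel + 1)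
          = if pos = -1 then count
            else altFindLoop t (PySem.Chars.findFrom t "## ".toList (pos + 1))
              (if pos = 0 ∨ PySem.List.pyGetD t (pos - 1) ' ' = ' ' ∨
                  PySem.List.pyGetD t (pos - 1) ' ' = '\n'
               then count + 1 else count) fuel := fun _ _ _ => rfl
      have hstep : altFindLoop t (q : Int) count (fuel + 1)
          = altFindLoop t (PySem.Chars.findFrom t "## ".toList (((q + 1 : Nat) : Int)))
              (if pvGood t q then count + 1 else count) fuel := by
        rw [hunf, if_neg hfind', show ((q : Int) + 1) = ((q + 1 : Nat) : Int) by push_cast; ring]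
        by_cases hc : pvGood t q = true
        · rw [if_pos (hcond.mpr hc), if_pos hc]
        · rw [if_neg (fun h => hc (hcond.mp h)), if_neg hc]
      rw [hstep, ih (q + 1) _ (by omega) (by omega), hsplit]
      rw [List.countP_append, List.countP_cons]
      push_cast [hzero]
      split_ifs <;> ring

lemma pv_portB_eq (text : String) :
    extract_header2_count_alt text
      = ((List.range text.toList.length).countP (pvGood text.toList) : Int) := by
  simp only [extract_header2_count_alt]
  have h := pv_altFindLoop_eq text.toList (text.toList.length + 1) 0 0 (Nat.zero_le _) (by omega)
  rw [Nat.sub_zero, ← List.range_eq_range'] at h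
  simpa using h

lemma pv_fold_count (m : Nat) (cond : Nat → Prop) [DecidablePred cond] (init : Int) :
    (List.range m).foldl (fun c k => if cond k then c + 1 else c) init
      = init + ((List.range m).countP (fun k => decide (cond k)) : Int) := by
  rw [← PySem.List.foldl_count_if (fun k => decide (cond k))]
  congr 1
  funext c k
  by_cases h : cond k <;> simp [h]

lemma pv_portA_eq (text : String) :
    extract_header2_count text
      = ((List.range text.toList.length).countP (pvGood text.toList) : Int) := by
  simp only [extract_header2_count]
  set t := text.toList with ht
  set n := t.length with hn
  rw [PySem.List.pyRange_one]
  rw [List.foldl_map]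
  have hfold := pv_fold_count (((n : Int) - 2 - 0).toNat)
      (fun k => PySem.List.slice t (some (0 + (k : Int))) (some (0 + (k : Int) + 4)) = " ## ".toList ∨
                PySem.List.slice t (some (0 + (k : Int))) (some (0 + (k : Int) + 4)) = "\n## ".toList)
  rw [hfold]
  -- the loop test at index k is exactly the marker test at position k + 1
  have hm : ((n : Int) - 2 - 0).toNat = n - 2 := by omega
  have hbody : ((List.range (((n : Int) - 2 - 0).toNat)).countP
        (fun (k : Nat) => decide (PySem.List.slice t (some (0 + (k : Int))) (some (0 + (k : Int) + 4)) = " ## ".toList ∨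
                          PySem.List.slice t (some (0 + (k : Int))) (some (0 + (k : Int) + 4)) = "\n## ".toList)))
      = (List.range (n - 2)).countP (fun k => pvGood t (k + 1)) := by
    rw [hm]
    apply List.countP_congr
    intro k _
    have hsl : PySem.List.slice t (some (0 + (k : Int))) (some (0 + (k : Int) + 4)) = (t.drop k).take 4 := by
      rw [zero_add, show (k : Int) + 4 = ((k + 4 : Nat) : Int) by push_cast; ring,
          PySem.List.slice_natCast]
      congr 1
      omega
    rw [hsl]
    simp only [decide_eq_true_eq]
    exact pv_window_iff t k
  rw [hbody]
  -- the start-of-string test is the marker test at position 0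
  have hc0 : (PySem.List.slice t (some 0) (some 3) = "## ".toList) ↔ pvGood t 0 = true := by
    rw [PySem.List.slice_zero_start, PySem.List.slice_to t (by norm_num : (0:Int) ≤ 3),
        show ((3:Int)).toNat = 3 from rfl]
    simp only [pvGood, List.drop_zero]
    constructor
    · intro h
      simp [List.prefix_iff_eq_take.mpr (by simpa using h.symm)]
    · intro h
      simp at h
      have := List.prefix_iff_eq_take.mp h
      simpa using this.symm
  -- split the full range at position 0
  rcases Nat.eq_zero_or_pos n with hn0 | hn1
  · have ht0 : t = [] := List.length_eq_zero_iff.mp hn0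
    simp [ht0, hn0, pvGood]
    decide
  · have hsplit : (List.range n).countP (pvGood t)
        = (if pvGood t 0 then 1 else 0) + (List.range (n - 1)).countP (fun k => pvGood t (k + 1)) := by
      rw [List.range_eq_range', show n = (n - 1) + 1 by omega, List.range'_succ,
          List.countP_cons, List.range'_eq_map_range, List.countP_map]
      have : ((List.range (n-1)).countP ((pvGood t) ∘ (fun x => 0 + 1 + x)))
          = (List.range (n-1)).countP (fun k => pvGood t (k + 1)) := by
        apply List.countP_congr
        intro k _
        simp [Nat.add_comm]
      rw [this]
      split_ifs <;> simp only [Nat.add_sub_cancel] <;> omega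
    have hext : (List.range (n - 1)).countP (fun k => pvGood t (k + 1))
        = (List.range (n - 2)).countP (fun k => pvGood t (k + 1)) := by
      apply pv_countP_range_ext _ _ _ (by omega)
      intro k hk1 hk2
      exact pvGood_false_of_big t (k + 1) (by omega)
    rw [hsplit, hext]
    push_cast
    split_ifs with h1 h2
    · ring
    · exact absurd (hc0.mp h1) h2
    · exact absurd (hc0.mpr (by assumption)) h1
    · ring

-- ===== VERDICT (by name: the statement is the Claim_ definition above) =====
theorem extract_header2_count_spec : Claim_equal_extract_header2_count := by
  intro text _
  unfold Spec_extract_header2_count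
  rw [pv_portA_eq, pv_portB_eq]
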